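-- pv_equiv track=rewrite | github.com/DominikWojtanowski/Matura-informatyka | 2015 - Przykladowy arkusz/Zadanie 3/zadanie_3.py | schodyZadanieC
-- ===== SOURCE A (Python) =====
-- from typing import List, Tuple
--
-- def schodyZadanieC(n: int, arr: List[int]) -> int:
--     najwieksza_liczba_progow = 0
--     liczba_progow_curr = 0
--     for i in range(1,n):
--         if arr[i - 1] >= arr[i]:
--             if arr[i - 1] > arr[i]:
--                 liczba_progow_curr += 1
--         else:
--             najwieksza_liczba_progow = liczba_progow_curr if liczba_progow_curr > najwieksza_liczba_progow else najwieksza_liczba_progow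
--             liczba_progow_curr = 0
--     return najwieksza_liczba_progow
-- ===== SOURCE B (Python) =====
-- def schodyZadanieC(n, arr):
--     # segment decomposition: ascent positions bound the runs; only runs closed
--     # by an ascent contribute (mirrors A, which never finalizes the last run)
--     ascents = [i for i in range(1, n) if arr[i - 1] < arr[i]]
--     best = 0
--     start = 1
--     for a in ascents:
--         cnt = sum(1 for j in range(start, a) if arr[j - 1] > arr[j])
--         best = max(best, cnt)
--         start = a + 1
--     return best
-- ===== Notes on version B (the rewrite author's own statement) =====
-- stated objective: alternative
-- what changed: Replaces A's single stateful pass (running counter reset on ascents) by a two-phase segment decomposition: first collect the ascent positions, then count strict descents per closed segment and take the maximum, deliberately leaving the trailing unfinalized run uncounted as A does.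
import Mathlib
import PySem

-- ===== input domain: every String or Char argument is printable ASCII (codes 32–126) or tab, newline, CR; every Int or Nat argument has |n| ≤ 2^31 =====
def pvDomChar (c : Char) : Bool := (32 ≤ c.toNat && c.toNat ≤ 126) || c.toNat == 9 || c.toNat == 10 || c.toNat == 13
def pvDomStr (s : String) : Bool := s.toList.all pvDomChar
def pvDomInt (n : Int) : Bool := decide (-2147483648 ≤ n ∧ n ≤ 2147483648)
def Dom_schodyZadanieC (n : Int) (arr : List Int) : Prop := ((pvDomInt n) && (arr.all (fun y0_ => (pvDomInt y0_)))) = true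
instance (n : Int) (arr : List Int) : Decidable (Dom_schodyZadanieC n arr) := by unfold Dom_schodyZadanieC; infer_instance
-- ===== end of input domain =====

-- B replaces A's single stateful pass by a segment decomposition (ascent positions bound
-- the runs; descents are counted per closed segment); objective: alternative, same cost.

-- shared indexing helper: arr[i] under Pre_ the index is always in range
def pvGetZ (arr : List Int) (i : Int) : Int := (PySem.List.pyGet? arr i).getD 0

-- ===== PORT A =====
def schodyZadanieC (n : Int) (arr : List Int) : Int :=
  ((PySem.List.pyRange 1 n 1).foldl (fun (s : Int × Int) i =>
      if pvGetZ arr (i - 1) ≥ pvGetZ arr i then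
        (s.1, if pvGetZ arr (i - 1) > pvGetZ arr i then s.2 + 1 else s.2)
      else
        ((if s.2 > s.1 then s.2 else s.1), 0)) ((0 : Int), (0 : Int))).1

-- ===== PORT B =====
def schodyZadanieC_alt (n : Int) (arr : List Int) : Int :=
  let ascents := (PySem.List.pyRange 1 n 1).filter (fun i => pvGetZ arr (i - 1) < pvGetZ arr i)
  (ascents.foldl (fun (s : Int × Int) a =>
      let cnt : Int := ((PySem.List.pyRange s.2 a 1).filter
          (fun j => pvGetZ arr (j - 1) > pvGetZ arr j)).length
      (max s.1 cnt, a + 1)) ((0 : Int), (1 : Int))).1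

-- ===== PRECONDITION & SPEC =====
-- Pre_ excludes exactly the inputs where A raises IndexError: n ≥ 2 with fewer than n elements.
def Pre_schodyZadanieC (n : Int) (arr : List Int) : Prop := n ≤ (arr.length : Int) ∨ n ≤ 1
instance (n : Int) (arr : List Int) : Decidable (Pre_schodyZadanieC n arr) := by unfold Pre_schodyZadanieC; infer_instance
def pvWitness_schodyZadanieC : Int × List Int := (4, [3, 1, 2, 0])

def Spec_schodyZadanieC (n : Int) (arr : List Int) (out : Int) : Prop := out = schodyZadanieC_alt n arr
instance (n : Int) (arr : List Int) (out : Int) : Decidable (Spec_schodyZadanieC n arr out) := by unfold Spec_schodyZadanieC; infer_instance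

-- ===== CLAIM (what is proved, stated in full; the proofs are below) =====
def Claim_equal_schodyZadanieC : Prop := ∀ (n : Int) (arr : List Int), Dom_schodyZadanieC n arr → Pre_schodyZadanieC n arr → Spec_schodyZadanieC n arr (schodyZadanieC n arr)

-- ===== LEMMAS AND PROOFS =====

-- A's loop step and B's fold step, named for the proofs
def pvStepA (arr : List Int) (s : Int × Int) (i : Int) : Int × Int :=
  if pvGetZ arr (i - 1) ≥ pvGetZ arr i then
    (s.1, if pvGetZ arr (i - 1) > pvGetZ arr i then s.2 + 1 else s.2)
  else
    ((if s.2 > s.1 then s.2 else s.1), 0)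

def pvStepB (arr : List Int) (s : Int × Int) (a : Int) : Int × Int :=
  (max s.1 (((PySem.List.pyRange s.2 a 1).filter
      (fun j => pvGetZ arr (j - 1) > pvGetZ arr j)).length : Int), a + 1)

-- number of strict descents arr[j-1] > arr[j] for j in range(s, t)
def pvCnt (arr : List Int) (s t : Int) : Int :=
  (((PySem.List.pyRange s t 1).filter (fun j => pvGetZ arr (j - 1) > pvGetZ arr j)).length : Int)

lemma pvCnt_self (arr : List Int) (s : Int) : pvCnt arr s s = 0 := by
  simp [pvCnt, PySem.List.pyRange_one_eq_nil (le_refl s)]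

lemma pvCnt_succ (arr : List Int) (s t : Int) (h : s ≤ t) :
    pvCnt arr s (t + 1) = pvCnt arr s t + (if pvGetZ arr (t - 1) > pvGetZ arr t then 1 else 0) := by
  unfold pvCnt
  rw [PySem.List.pyRange_one_succ_right h, List.filter_append]
  by_cases hgt : pvGetZ arr (t - 1) > pvGetZ arr t <;>
    simp [hgt, List.length_append]

-- the loop invariant: A's running best equals B's, A's current-run counter equals the
-- descent count of the still-open segment [rB.2, 1+m)
lemma pvInvariant (arr : List Int) (m : Nat) :
    let L := PySem.List.pyRange 1 (1 + (m : Int)) 1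
    let rA := L.foldl (pvStepA arr) ((0 : Int), (0 : Int))
    let rB := (L.filter (fun i => pvGetZ arr (i - 1) < pvGetZ arr i)).foldl (pvStepB arr) ((0 : Int), (1 : Int))
    rA.1 = rB.1 ∧ 1 ≤ rB.2 ∧ rB.2 ≤ 1 + (m : Int) ∧ rA.2 = pvCnt arr rB.2 (1 + (m : Int)) := by
  induction m with
  | zero =>
      simp [PySem.List.pyRange_one_eq_nil (le_refl (1 : Int)), pvCnt_self]
  | succ m ih =>
      obtain ⟨h1, h2, h3, h4⟩ := ih
      have hsplit : PySem.List.pyRange 1 (1 + ((m : Int) + 1)) 1 =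
          PySem.List.pyRange 1 (1 + (m : Int)) 1 ++ [1 + (m : Int)] := by
        have : (1 : Int) + ((m : Int) + 1) = (1 + (m : Int)) + 1 := by ring
        rw [this, PySem.List.pyRange_one_succ_right (by omega)]
      push_cast
      rw [hsplit, List.foldl_append, List.filter_append, List.foldl_append]
      set rA := (PySem.List.pyRange 1 (1 + (m : Int)) 1).foldl (pvStepA arr) ((0 : Int), (0 : Int)) with hrA
      set rB := ((PySem.List.pyRange 1 (1 + (m : Int)) 1).filter
          (fun i => pvGetZ arr (i - 1) < pvGetZ arr i)).foldl (pvStepB arr) ((0 : Int), (1 : Int)) with hrB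
      by_cases hasc : pvGetZ arr (1 + (m : Int) - 1) < pvGetZ arr (1 + (m : Int))
      · -- ascent at 1+m: A closes the run, B processes ascent 1+m
        have hnge : ¬ (pvGetZ arr (1 + (m : Int) - 1) ≥ pvGetZ arr (1 + (m : Int))) := by omega
        simp only [List.filter_cons, List.filter_nil, hasc, decide_true, if_true,
          List.foldl_cons, List.foldl_nil, pvStepA, pvStepB, hnge, if_false]
        refine ⟨?_, by omega, by omega, ?_⟩
        · rw [h1, ← pvCnt, ← h4]
          by_cases hgt : rA.2 > rB.1 <;> simp [hgt] <;> omega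
        · simpa using (pvCnt_self arr (1 + (m : Int) + 1)).symm
      · -- no ascent: B's state unchanged, A's counter extends over the open segment
        have hge : pvGetZ arr (1 + (m : Int) - 1) ≥ pvGetZ arr (1 + (m : Int)) := by omega
        simp only [List.filter_cons, List.filter_nil, hasc, decide_false, Bool.false_eq_true, if_false,
          List.foldl_cons, List.foldl_nil, pvStepA, hge, if_true]
        refine ⟨h1, h2, by omega, ?_⟩
        rw [show (1 : Int) + ((m : Int) + 1) = (1 + (m : Int)) + 1 from by ring]
        rw [pvCnt_succ arr rB.2 (1 + (m : Int)) h3, ← h4]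
        split_ifs <;> omega

lemma pvA_eq_fold (n : Int) (arr : List Int) :
    schodyZadanieC n arr = ((PySem.List.pyRange 1 n 1).foldl (pvStepA arr) ((0 : Int), (0 : Int))).1 := rfl

lemma pvB_eq_fold (n : Int) (arr : List Int) :
    schodyZadanieC_alt n arr = (((PySem.List.pyRange 1 n 1).filter
      (fun i => pvGetZ arr (i - 1) < pvGetZ arr i)).foldl (pvStepB arr) ((0 : Int), (1 : Int))).1 := rfl

-- ===== VERDICT (by name: the statement is the Claim_ definition above) =====
theorem schodyZadanieC_spec : Claim_equal_schodyZadanieC := by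
  intro n arr _ _
  unfold Spec_schodyZadanieC
  rw [pvA_eq_fold, pvB_eq_fold]
  by_cases hn : n ≤ 1
  · rw [PySem.List.pyRange_one_eq_nil hn]; rfl
  · have hm : n = 1 + ((n - 1).toNat : Int) := by omega
    rw [hm]
    exact (pvInvariant arr (n - 1).toNat).1
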